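-- pv_equiv track=rewrite | github.com/DevonLowjamski/Chimera | tier2_auto_refactor.py | extract_using_statements
-- ===== SOURCE A (Python) =====
-- def extract_using_statements(lines):
--     """Extract using statements from file"""
--     using_statements = []
--     for line in lines:
--         stripped = line.strip()
--         if stripped.startswith('using ') and not stripped.startswith('using ('):
--             using_statements.append(line.rstrip())
--         elif stripped and not stripped.startswith('//') and not stripped.startswith('using'):
--             break
--     return using_statements
-- ===== SOURCE B (Python) =====
-- def extract_using_statements(lines):
--     """Extract using statements from file"""
--     stop = next((i for i, line in enumerate(lines)
--                  if (s := line.strip()) and not s.startswith('//') and not s.startswith('using')),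
--                 len(lines))
--     return [line.rstrip() for line in lines[:stop]
--             if line.strip().startswith('using ') and not line.strip().startswith('using (')]
-- ===== Notes on version B (the rewrite author's own statement) =====
-- stated objective: alternative
-- what changed: Replaces A's single fused loop (accumulator + break) with two separate passes: first find the index of the first significant non-using line, then a list comprehension that filters and rstrips the prefix before that index.
import Mathlib
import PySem

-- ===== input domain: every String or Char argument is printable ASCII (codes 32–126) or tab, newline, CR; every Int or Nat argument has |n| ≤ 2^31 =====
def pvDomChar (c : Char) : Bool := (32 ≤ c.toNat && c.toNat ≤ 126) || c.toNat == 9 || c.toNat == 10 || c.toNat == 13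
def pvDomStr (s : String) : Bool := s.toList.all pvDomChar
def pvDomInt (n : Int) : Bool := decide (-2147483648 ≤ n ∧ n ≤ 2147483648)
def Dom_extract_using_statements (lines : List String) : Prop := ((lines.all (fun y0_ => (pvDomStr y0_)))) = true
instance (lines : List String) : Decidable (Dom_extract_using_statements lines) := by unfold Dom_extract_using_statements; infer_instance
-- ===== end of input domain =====

-- B replaces A's fused loop-with-break by two passes: find the stop index, then filter+rstrip the prefix (alternative decomposition, same cost).

-- ===== PORT A =====
-- A's for-loop with accumulator and break, as structural recursion over the lines.
def euLoopA (lines : List String) (acc : List String) : List String :=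
  match lines with
  | [] => acc
  | line :: rest =>
    let stripped := PySem.Str.strip line
    if PySem.Str.startswith stripped "using " && !(PySem.Str.startswith stripped "using (") then
      euLoopA rest (acc ++ [PySem.Str.rstrip line])
    else if !(stripped == "") && !(PySem.Str.startswith stripped "//") && !(PySem.Str.startswith stripped "using") then
      acc
    else
      euLoopA rest acc

def extract_using_statements (lines : List String) : List String :=
  euLoopA lines []

-- ===== PORT B =====
-- B: index of the first significant non-using line (length if none), then filter+rstrip the prefix before it.
def extract_using_statements_alt (lines : List String) : List String :=
  ((lines.take (lines.findIdx fun line =>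
      !(PySem.Str.strip line == "") && !(PySem.Str.startswith (PySem.Str.strip line) "//") &&
        !(PySem.Str.startswith (PySem.Str.strip line) "using"))).filter (fun line =>
      PySem.Str.startswith (PySem.Str.strip line) "using " &&
        !(PySem.Str.startswith (PySem.Str.strip line) "using ("))).map PySem.Str.rstrip

-- ===== PRECONDITION & SPEC =====
def Spec_extract_using_statements (lines : List String) (out : List String) : Prop := out = extract_using_statements_alt lines
instance (lines : List String) (out : List String) : Decidable (Spec_extract_using_statements lines out) := by unfold Spec_extract_using_statements; infer_instance

-- ===== CLAIM (what is proved, stated in full; the proofs are below) =====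
def Claim_equal_extract_using_statements : Prop := ∀ (lines : List String), Dom_extract_using_statements lines → Spec_extract_using_statements lines (extract_using_statements lines)

-- ===== LEMMAS AND PROOFS =====

-- a string starting with "using " starts with "using"
theorem sw_using_mono (s : String) (h : PySem.Str.startswith s "using " = true) :
    PySem.Str.startswith s "using" = true := by
  simp only [PySem.Str.startswith_eq, PySem.Chars.startswith_iff] at h ⊢
  exact List.IsPrefix.trans (by decide) h

-- one step of A's loop
theorem euLoopA_cons (l : String) (rest acc : List String) :
    euLoopA (l :: rest) acc =
      if (PySem.Str.startswith (PySem.Str.strip l) "using " &&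
            !(PySem.Str.startswith (PySem.Str.strip l) "using (")) = true then
        euLoopA rest (acc ++ [PySem.Str.rstrip l])
      else if (!(PySem.Str.strip l == "") && !(PySem.Str.startswith (PySem.Str.strip l) "//") &&
            !(PySem.Str.startswith (PySem.Str.strip l) "using")) = true then
        acc
      else
        euLoopA rest acc := rfl

-- one step of B's two-pass computation
theorem alt_cons (l : String) (rest : List String) :
    extract_using_statements_alt (l :: rest) =
      if (!(PySem.Str.strip l == "") && !(PySem.Str.startswith (PySem.Str.strip l) "//") &&
            !(PySem.Str.startswith (PySem.Str.strip l) "using")) = true then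
        []
      else if (PySem.Str.startswith (PySem.Str.strip l) "using " &&
            !(PySem.Str.startswith (PySem.Str.strip l) "using (")) = true then
        PySem.Str.rstrip l :: extract_using_statements_alt rest
      else
        extract_using_statements_alt rest := by
  cases hb : (!(PySem.Str.strip l == "") && !(PySem.Str.startswith (PySem.Str.strip l) "//") &&
      !(PySem.Str.startswith (PySem.Str.strip l) "using")) with
  | true =>
    rw [if_pos rfl]
    unfold extract_using_statements_alt
    rw [List.findIdx_cons, hb, cond_true, List.take_zero, List.filter_nil, List.map_nil]
  | false =>
    rw [if_neg (by exact Bool.false_ne_true)]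
    unfold extract_using_statements_alt
    rw [List.findIdx_cons, hb, cond_false, List.take_succ_cons]
    cases hk : (PySem.Str.startswith (PySem.Str.strip l) "using " &&
        !(PySem.Str.startswith (PySem.Str.strip l) "using (")) with
    | true =>
      rw [if_pos rfl]
      simp only [List.filter_cons]
      rw [if_pos hk, List.map_cons]
    | false =>
      rw [if_neg (by exact Bool.false_ne_true)]
      simp only [List.filter_cons]
      rw [if_neg (fun h => Bool.false_ne_true (hk ▸ h))]

theorem euLoopA_eq (lines acc : List String) :
    euLoopA lines acc = acc ++ extract_using_statements_alt lines := by
  induction lines generalizing acc with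
  | nil => simp [euLoopA, extract_using_statements_alt]
  | cons l rest ih =>
    rw [euLoopA_cons, alt_cons]
    cases hk : (PySem.Str.startswith (PySem.Str.strip l) "using " &&
        !(PySem.Str.startswith (PySem.Str.strip l) "using (")) with
    | true =>
      have hu : PySem.Str.startswith (PySem.Str.strip l) "using" = true :=
        sw_using_mono _ ((Bool.and_eq_true _ _).mp hk).1
      have hb : (!(PySem.Str.strip l == "") && !(PySem.Str.startswith (PySem.Str.strip l) "//") &&
          !(PySem.Str.startswith (PySem.Str.strip l) "using")) = false := by
        rw [hu]; simp
      rw [if_pos rfl, if_neg (by rw [hb]; exact Bool.false_ne_true), if_pos rfl, ih]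
      simp
    | false =>
      rw [if_neg (by exact Bool.false_ne_true)]
      cases hb : (!(PySem.Str.strip l == "") && !(PySem.Str.startswith (PySem.Str.strip l) "//") &&
          !(PySem.Str.startswith (PySem.Str.strip l) "using")) with
      | true => rw [if_pos rfl, if_pos rfl, List.append_nil]
      | false =>
        rw [if_neg (by exact Bool.false_ne_true),
          if_neg (by exact Bool.false_ne_true),
          if_neg (by exact Bool.false_ne_true), ih]

-- ===== VERDICT (by name: the statement is the Claim_ definition above) =====
theorem extract_using_statements_spec : Claim_equal_extract_using_statements := by
  intro lines _
  show extract_using_statements lines = extract_using_statements_alt lines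
  simpa using euLoopA_eq lines []
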